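-- pv_equiv track=rewrite | github.com/memamun/AI-System-DocAI-V5I | src/reasoning.py | _generate_answer_from_facts
-- ===== SOURCE A (Python) =====
-- from typing import Dict, List, Any, Optional, Tuple
--
-- def _generate_answer_from_facts(supporting_facts: List[str], context: List[Dict[str, Any]]) -> str:
--     """Generate an answer from supporting facts when LLM response doesn't contain a clear answer"""
--     if not supporting_facts:
--         return "No clear answer found in response."
--
--     # Look for definition-like facts
--     for fact in supporting_facts:
--         # Check if this fact contains a definition
--         if any(pattern in fact.lower() for pattern in ['is a', 'is defined as', 'refers to', 'encompasses', 'involves']):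
--             return fact
--
--     # Look for facts that mention the topic and provide information
--     topic_indicators = ['classroom management', 'management', 'teaching', 'education']
--     for fact in supporting_facts:
--         if any(topic in fact.lower() for topic in topic_indicators):
--             return fact
--
--     # Use the first substantial fact
--     for fact in supporting_facts:
--         if len(fact.strip()) > 20:  # Substantial fact
--             return fact
--
--     # Fallback to first fact
--     return supporting_facts[0] if supporting_facts else "No clear answer found in response."
-- ===== SOURCE B (Python) =====
-- from typing import Dict, List, Any
--
-- def _generate_answer_from_facts(supporting_facts: List[str], context: List[Dict[str, Any]]) -> str:
--     """Single-pass re-implementation: keep the first match of each priority tier."""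
--     if not supporting_facts:
--         return "No clear answer found in response."
--     def_fact = topic_fact = substantial_fact = None
--     for fact in supporting_facts:
--         low = fact.lower()
--         if def_fact is None and any(p in low for p in ['is a', 'is defined as', 'refers to', 'encompasses', 'involves']):
--             def_fact = fact
--         if topic_fact is None and any(t in low for t in ['classroom management', 'management', 'teaching', 'education']):
--             topic_fact = fact
--         if substantial_fact is None and len(fact.strip()) > 20:
--             substantial_fact = fact
--     if def_fact is not None:
--         return def_fact
--     if topic_fact is not None:
--         return topic_fact
--     if substantial_fact is not None:
--         return substantial_fact
--     return supporting_facts[0]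
-- ===== Notes on version B (the rewrite author's own statement) =====
-- stated objective: alternative
-- what changed: Replaces A's three sequential scans over supporting_facts by a single pass that records the first fact matching each priority tier and resolves the priority afterwards.
import Mathlib
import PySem

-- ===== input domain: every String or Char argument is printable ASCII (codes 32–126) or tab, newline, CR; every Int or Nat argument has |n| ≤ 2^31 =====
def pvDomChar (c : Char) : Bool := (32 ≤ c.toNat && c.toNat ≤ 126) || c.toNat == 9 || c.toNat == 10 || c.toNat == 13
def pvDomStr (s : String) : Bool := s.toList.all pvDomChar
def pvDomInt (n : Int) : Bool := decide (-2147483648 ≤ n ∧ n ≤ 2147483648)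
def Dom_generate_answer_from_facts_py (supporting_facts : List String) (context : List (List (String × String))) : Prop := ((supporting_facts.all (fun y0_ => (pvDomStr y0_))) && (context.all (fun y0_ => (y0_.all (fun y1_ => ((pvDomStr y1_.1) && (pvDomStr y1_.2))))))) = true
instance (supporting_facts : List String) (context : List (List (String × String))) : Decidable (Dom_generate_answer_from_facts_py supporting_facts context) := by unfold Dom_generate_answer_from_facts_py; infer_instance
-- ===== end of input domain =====

-- B replaces A's three sequential scans by one pass keeping the first match of each priority tier.

-- ===== PORT A =====
-- 'any(pattern in fact.lower() for pattern in [...])'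
def pvDefP (fact : String) : Bool :=
  (["is a", "is defined as", "refers to", "encompasses", "involves"] : List String).any
    (fun p => PySem.Str.isIn p (PySem.Str.lower fact))

def pvTopicP (fact : String) : Bool :=
  (["classroom management", "management", "teaching", "education"] : List String).any
    (fun t => PySem.Str.isIn t (PySem.Str.lower fact))

def pvSubP (fact : String) : Bool := 20 < PySem.Str.len (PySem.Str.strip fact)

-- three for-loops with early return, in A's order
def generate_answer_from_facts_py (supporting_facts : List String) (context : List (List (String × String))) : String :=
  if supporting_facts.isEmpty then "No clear answer found in response."
  else
    match supporting_facts.find? pvDefP with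
    | some fact => fact
    | none =>
      match supporting_facts.find? pvTopicP with
      | some fact => fact
      | none =>
        match supporting_facts.find? pvSubP with
        | some fact => fact
        | none => supporting_facts.headD "No clear answer found in response."

-- ===== PORT B =====
-- one fold step: set each slot only if still None and its predicate holds
def pvStep (st : Option String × Option String × Option String) (fact : String) :
    Option String × Option String × Option String :=
  let (d, t, s) := st
  (if d.isNone && pvDefP fact then some fact else d,
   if t.isNone && pvTopicP fact then some fact else t,
   if s.isNone && pvSubP fact then some fact else s)

def generate_answer_from_facts_py_alt (supporting_facts : List String) (context : List (List (String × String))) : String :=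
  match supporting_facts with
  | [] => "No clear answer found in response."
  | f0 :: _ =>
    let (d, t, s) := supporting_facts.foldl pvStep (none, none, none)
    match d with
    | some x => x
    | none =>
      match t with
      | some x => x
      | none =>
        match s with
        | some x => x
        | none => f0

-- ===== PRECONDITION & SPEC =====
def Spec_generate_answer_from_facts_py (supporting_facts : List String) (context : List (List (String × String))) (out : String) : Prop := out = generate_answer_from_facts_py_alt supporting_facts context
instance (supporting_facts : List String) (context : List (List (String × String))) (out : String) : Decidable (Spec_generate_answer_from_facts_py supporting_facts context out) := by unfold Spec_generate_answer_from_facts_py; infer_instance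

-- ===== CLAIM (what is proved, stated in full; the proofs are below) =====
def Claim_equal_generate_answer_from_facts_py : Prop := ∀ (supporting_facts : List String) (context : List (List (String × String))), Dom_generate_answer_from_facts_py supporting_facts context → Spec_generate_answer_from_facts_py supporting_facts context (generate_answer_from_facts_py supporting_facts context)

-- ===== LEMMAS AND PROOFS =====
theorem foldl_pvStep (xs : List String) (d t s : Option String) :
    xs.foldl pvStep (d, t, s) =
      (d.orElse (fun _ => xs.find? pvDefP),
       t.orElse (fun _ => xs.find? pvTopicP),
       s.orElse (fun _ => xs.find? pvSubP)) := by
  induction xs generalizing d t s with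
  | nil => cases d <;> cases t <;> cases s <;> simp [Option.orElse]
  | cons x xs ih =>
    simp only [List.foldl_cons, List.find?_cons, pvStep]
    rw [ih]
    cases d <;> cases t <;> cases s <;>
      by_cases hd : pvDefP x <;> by_cases ht : pvTopicP x <;> by_cases hs : pvSubP x <;>
      simp [hd, ht, hs, Option.orElse]

-- ===== VERDICT (by name: the statement is the Claim_ definition above) =====
theorem generate_answer_from_facts_py_spec : Claim_equal_generate_answer_from_facts_py := by
  intro sf ctx _
  unfold Spec_generate_answer_from_facts_py generate_answer_from_facts_py generate_answer_from_facts_py_alt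
  cases sf with
  | nil => simp
  | cons f0 rest =>
    rw [foldl_pvStep]
    simp only [List.isEmpty_cons, if_neg Bool.false_ne_true, Option.orElse]
    cases h1 : (f0 :: rest).find? pvDefP <;>
      cases h2 : (f0 :: rest).find? pvTopicP <;>
      cases h3 : (f0 :: rest).find? pvSubP <;> simp
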